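-- pv_equiv track=rewrite | github.com/NILGroup/TFG-1920-CarlosMoreno | Análisis de estilo/preprocessor.py | __clean_decoded_text
-- ===== SOURCE A (Python) =====
-- def __clean_decoded_text(text):
--     """
--     Removes soft break lines of the message body.
--
--     Parameters
--     ----------
--     text: str
--         Message body
--
--     Returns
--     -------
--     str: Message body without soft break lines.
--     """
--     new_text = ""
--     i = 0
--     n = len(text)
--     while i < n:
--         if (text[i] == '\r' and (i + 1 < n) and text[i + 1] == '\n'):
--             i += 2
--             while((i + 1 < n) and text[i] == '\r' and text[i + 1] == '\n'):
--                 new_text += text[i] + text[i + 1]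
--                 i += 2
--         elif (text[i] == '\n'):
--             i += 1
--             while((i < n) and text[i] == '\n'):
--                 new_text += text[i]
--                 i += 1
--         else:
--             new_text += text[i]
--             i += 1
--
--     return new_text
-- ===== SOURCE B (Python) =====
-- def _from_normal(c, pending):
--     """Transition from the neutral state; `pending` is text already owed to the output."""
--     if c == '\r':
--         return 1, pending          # maybe the start of a CRLF pair
--     if c == '\n':
--         return 4, pending          # first LF of an LF-run: dropped
--     return 0, pending + c
--
--
-- def _step(state, c):
--     """One DFA transition: returns (new_state, emitted piece).
--
--     states: 0 neutral | 1 pending '\r' (neutral) | 2 inside a CRLF-run |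
--             3 pending '\r' inside a CRLF-run | 4 inside an LF-run
--     """
--     if state == 1:
--         if c == '\n':
--             return 2, ''           # first CRLF pair of the run: dropped
--         return _from_normal(c, '\r')
--     if state == 3:
--         if c == '\n':
--             return 2, '\r\n'       # later CRLF pair of the run: kept
--         return _from_normal(c, '\r')
--     if state == 2:
--         if c == '\r':
--             return 3, ''
--         return _from_normal(c, '')
--     if state == 4:
--         if c == '\n':
--             return 4, '\n'         # later LF of the run: kept
--         return _from_normal(c, '')
--     return _from_normal(c, '')
--
--
-- def __clean_decoded_text(text):
--     state = 0
--     pieces = []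
--     for c in text:
--         state, piece = _step(state, c)
--         pieces.append(piece)
--     if state == 1 or state == 3:
--         pieces.append('\r')        # flush a trailing lone '\r'
--     return ''.join(pieces)
-- ===== Notes on version B (the rewrite author's own statement) =====
-- stated objective: faster
-- what changed: Replaced the nested index-based while loops with look-ahead by a single left-to-right fold through an explicit 5-state DFA (no indexing, no look-ahead), collecting pieces and joining once at the end.
import Mathlib
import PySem

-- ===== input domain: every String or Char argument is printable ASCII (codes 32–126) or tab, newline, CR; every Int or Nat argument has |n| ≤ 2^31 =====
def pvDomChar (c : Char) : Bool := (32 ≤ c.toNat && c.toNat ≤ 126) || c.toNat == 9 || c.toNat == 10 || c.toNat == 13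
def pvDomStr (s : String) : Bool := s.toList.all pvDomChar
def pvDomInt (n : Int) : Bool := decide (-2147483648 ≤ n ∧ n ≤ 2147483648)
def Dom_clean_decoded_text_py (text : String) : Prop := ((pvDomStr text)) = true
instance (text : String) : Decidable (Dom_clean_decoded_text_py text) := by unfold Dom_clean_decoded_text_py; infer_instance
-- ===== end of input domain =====

-- B replaces A's nested index/look-ahead while loops by a one-pass 5-state DFA fold
-- with a single final join (measurably faster by a constant factor: no per-char string +=).

-- ===== PORT A =====
-- A's while loops are ported as fuel-bounded structural recursions; the fuel passed in
-- (length-derived) always suffices, so each loop runs exactly as Python's does.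
-- inner while of the first branch: while (i+1<n) and text[i]=='\r' and text[i+1]=='\n'
def pvInnerPair (l : List Char) (n : Nat) : Nat → Nat → List Char → Nat × List Char
  | 0, i, acc => (i, acc)
  | fuel + 1, i, acc =>
    if i + 1 < n ∧ l.getD i ' ' = '\r' ∧ l.getD (i + 1) ' ' = '\n' then
      pvInnerPair l n fuel (i + 2) (acc ++ [l.getD i ' ', l.getD (i + 1) ' '])
    else (i, acc)

-- inner while of the second branch: while (i<n) and text[i]=='\n'
def pvInnerNl (l : List Char) (n : Nat) : Nat → Nat → List Char → Nat × List Char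
  | 0, i, acc => (i, acc)
  | fuel + 1, i, acc =>
    if i < n ∧ l.getD i ' ' = '\n' then
      pvInnerNl l n fuel (i + 1) (acc ++ [l.getD i ' '])
    else (i, acc)

-- the outer while loop of A
def pvOuter (l : List Char) (n : Nat) : Nat → Nat → List Char → List Char
  | 0, _, acc => acc
  | fuel + 1, i, acc =>
    if i < n then
      if l.getD i ' ' = '\r' ∧ i + 1 < n ∧ l.getD (i + 1) ' ' = '\n' then
        let r := pvInnerPair l n n (i + 2) acc
        pvOuter l n fuel r.1 r.2
      else if l.getD i ' ' = '\n' then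
        let r := pvInnerNl l n n (i + 1) acc
        pvOuter l n fuel r.1 r.2
      else
        pvOuter l n fuel (i + 1) (acc ++ [l.getD i ' '])
    else acc

def clean_decoded_text_py (text : String) : String :=
  String.mk (pvOuter text.toList text.toList.length (text.toList.length + 1) 0 [])

-- ===== PORT B =====
-- transition from the neutral state; `pre` is text already owed to the output
def pvFrom0 (c : Char) (pre : List Char) : Nat × List Char :=
  if c = '\r' then (1, pre)
  else if c = '\n' then (4, pre)
  else (0, pre ++ [c])

-- one DFA transition (states 0 neutral, 1 pending CR, 2 in CRLF-run, 3 pending CR in run, 4 in LF-run)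
def pvStep (st : Nat) (c : Char) : Nat × List Char :=
  if st = 1 then (if c = '\n' then (2, []) else pvFrom0 c ['\r'])
  else if st = 3 then (if c = '\n' then (2, ['\r', '\n']) else pvFrom0 c ['\r'])
  else if st = 2 then (if c = '\r' then (3, []) else pvFrom0 c [])
  else if st = 4 then (if c = '\n' then (4, ['\n']) else pvFrom0 c [])
  else pvFrom0 c []

def clean_decoded_text_py_alt (text : String) : String :=
  let r := text.toList.foldl
    (fun (p : Nat × List (List Char)) c =>
      let s := pvStep p.1 c
      (s.1, p.2 ++ [s.2])) (0, [])
  let pieces := if r.1 = 1 ∨ r.1 = 3 then r.2 ++ [['\r']] else r.2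
  String.mk pieces.flatten

-- ===== PRECONDITION & SPEC =====
def Spec_clean_decoded_text_py (text : String) (out : String) : Prop := out = clean_decoded_text_py_alt text
instance (text : String) (out : String) : Decidable (Spec_clean_decoded_text_py text out) := by unfold Spec_clean_decoded_text_py; infer_instance

-- ===== CLAIM (what is proved, stated in full; the proofs are below) =====
def Claim_equal_clean_decoded_text_py : Prop := ∀ (text : String), Dom_clean_decoded_text_py text → Spec_clean_decoded_text_py text (clean_decoded_text_py text)

-- ===== LEMMAS AND PROOFS =====

-- mathematical one-pass runner equal to B's fold
def pvRun (st : Nat) : List Char → List Char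
  | [] => if st = 1 ∨ st = 3 then ['\r'] else []
  | c :: r => (pvStep st c).2 ++ pvRun (pvStep st c).1 r

theorem pvRun_cons (st : Nat) (c : Char) (r : List Char) :
    pvRun st (c :: r) = (pvStep st c).2 ++ pvRun (pvStep st c).1 r := rfl

-- closed transitions
theorem pvStep0_cr : pvStep 0 '\r' = (1, []) := by decide
theorem pvStep0_nl : pvStep 0 '\n' = (4, []) := by decide
theorem pvStep1_nl : pvStep 1 '\n' = (2, []) := by decide
theorem pvStep2_cr : pvStep 2 '\r' = (3, []) := by decide
theorem pvStep3_nl : pvStep 3 '\n' = (2, ['\r', '\n']) := by decide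
theorem pvStep4_nl : pvStep 4 '\n' = (4, ['\n']) := by decide

-- generic transitions
theorem pvStep0_other (c : Char) (h1 : ¬c = '\r') (h2 : ¬c = '\n') :
    pvStep 0 c = (0, [c]) := by
  simp [pvStep, pvFrom0, h1, h2]

theorem pvStep1_other (c : Char) (h : ¬c = '\n') :
    pvStep 1 c = ((pvStep 0 c).1, '\r' :: (pvStep 0 c).2) := by
  simp only [pvStep, pvFrom0]
  norm_num [h]
  split_ifs <;> simp

theorem pvStep2_other (c : Char) (h : ¬c = '\r') : pvStep 2 c = pvStep 0 c := by
  simp [pvStep, h]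

theorem pvStep3_other (c : Char) (h : ¬c = '\n') : pvStep 3 c = pvStep 1 c := by
  simp [pvStep, h]

theorem pvStep4_other (c : Char) (h : ¬c = '\n') : pvStep 4 c = pvStep 0 c := by
  simp [pvStep, h]

theorem pvFold_run (l : List Char) (st : Nat) (ps : List (List Char)) :
    (let r := l.foldl (fun (p : Nat × List (List Char)) c =>
        let s := pvStep p.1 c
        (s.1, p.2 ++ [s.2])) (st, ps)
     (if r.1 = 1 ∨ r.1 = 3 then r.2 ++ [['\r']] else r.2).flatten)
    = ps.flatten ++ pvRun st l := by
  induction l generalizing st ps with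
  | nil => simp [pvRun]; split <;> simp
  | cons c r ih =>
      simp only [List.foldl_cons, pvRun]
      rw [ih]
      simp

theorem pvAlt_eq_run (text : String) :
    clean_decoded_text_py_alt text = String.mk (pvRun 0 text.toList) := by
  unfold clean_decoded_text_py_alt
  have := pvFold_run text.toList 0 []
  simp only at this
  simp only [this, List.flatten_nil, List.nil_append]

-- pvRun 1 is a pending '\r' followed by the neutral state, when no '\n' comes next
theorem pvRun1_eq (l : List Char) (h : l.head? ≠ some '\n') :
    pvRun 1 l = '\r' :: pvRun 0 l := by
  match l with
  | [] => decide
  | c :: r =>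
      have hc : ¬c = '\n' := by intro hh; subst hh; simp at h
      rw [pvRun_cons, pvRun_cons, pvStep1_other c hc]
      simp

theorem pvRun3_eq_run1 (l : List Char) (h : l.head? ≠ some '\n') :
    pvRun 3 l = pvRun 1 l := by
  match l with
  | [] => decide
  | c :: r =>
      have hc : ¬c = '\n' := by intro hh; subst hh; simp at h
      rw [pvRun_cons, pvRun_cons, pvStep3_other c hc]

theorem pvRun4_eq_run0 (l : List Char) (h : l.head? ≠ some '\n') :
    pvRun 4 l = pvRun 0 l := by
  match l with
  | [] => decide
  | c :: r =>
      have hc : ¬c = '\n' := by intro hh; subst hh; simp at h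
      rw [pvRun_cons, pvRun_cons, pvStep4_other c hc]

theorem pvRun2_eq_run0 (l : List Char) (h : l.take 2 ≠ ['\r', '\n']) :
    pvRun 2 l = pvRun 0 l := by
  match l with
  | [] => decide
  | [c] =>
      by_cases hc : c = '\r'
      · subst hc; decide
      · rw [pvRun_cons, pvStep2_other c hc]
        conv_rhs => rw [pvRun_cons]
  | c :: c2 :: r =>
      by_cases hc : c = '\r'
      · subst hc
        have hc2 : ¬c2 = '\n' := by intro hh; subst hh; exact h (by simp)
        rw [pvRun_cons, pvStep2_cr]
        conv_rhs => rw [pvRun_cons, pvStep0_cr]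
        simp only [List.nil_append]
        exact pvRun3_eq_run1 (c2 :: r) (by simp [hc2])
      · rw [pvRun_cons, pvStep2_other c hc]
        conv_rhs => rw [pvRun_cons]

-- drop-head bridges
theorem pvDrop_cons (l : List Char) (i : Nat) (h : i < l.length) :
    l.drop i = l.getD i ' ' :: l.drop (i + 1) := by
  rw [List.getD_eq_getElem l ' ' h]
  exact List.drop_eq_getElem_cons h

theorem pvHead_drop (l : List Char) (i : Nat)
    (h : ¬(i < l.length ∧ l.getD i ' ' = '\n')) :
    (l.drop i).head? ≠ some '\n' := by
  rw [List.head?_drop]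
  by_cases hi : i < l.length
  · rw [List.getElem?_eq_getElem hi]
    intro hh
    simp only [Option.some.injEq] at hh
    exact h ⟨hi, by rw [List.getD_eq_getElem l ' ' hi, hh]⟩
  · rw [List.getElem?_eq_none (by omega)]; simp

theorem pvTake2_drop (l : List Char) (i : Nat)
    (h : ¬(i + 1 < l.length ∧ l.getD i ' ' = '\r' ∧ l.getD (i + 1) ' ' = '\n')) :
    (l.drop i).take 2 ≠ ['\r', '\n'] := by
  intro hh
  have hlen : 2 ≤ (l.drop i).length := by
    by_contra hlt
    push_neg at hlt
    rw [List.take_of_length_le (by omega)] at hh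
    have hl := congrArg List.length hh
    simp only [List.length_cons, List.length_nil] at hl
    omega
  have hlen2 : i + 1 < l.length := by
    simp only [List.length_drop] at hlen
    omega
  have h0 : (l.drop i)[0]? = some '\r' := by
    have := congrArg (fun t => t[0]?) hh
    simpa [List.getElem?_take] using this
  have h1 : (l.drop i)[1]? = some '\n' := by
    have := congrArg (fun t => t[1]?) hh
    simpa [List.getElem?_take] using this
  rw [List.getElem?_drop] at h0 h1
  refine h ⟨hlen2, ?_, ?_⟩
  · rw [List.getD_eq_getElem?_getD]
    simpa using congrArg (fun o => o.getD ' ') h0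
  · rw [List.getD_eq_getElem?_getD]
    simpa using congrArg (fun o => o.getD ' ') h1

theorem pvInnerPair_ge (l : List Char) (n fuel i : Nat) (acc : List Char) :
    i ≤ (pvInnerPair l n fuel i acc).1 := by
  induction fuel generalizing i acc with
  | zero => simp [pvInnerPair]
  | succ fuel ih =>
      simp only [pvInnerPair]
      split
      · exact le_trans (by omega) (ih (i + 2) _)
      · simp

theorem pvInnerNl_ge (l : List Char) (n fuel i : Nat) (acc : List Char) :
    i ≤ (pvInnerNl l n fuel i acc).1 := by
  induction fuel generalizing i acc with
  | zero => simp [pvInnerNl]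
  | succ fuel ih =>
      simp only [pvInnerNl]
      split
      · exact le_trans (by omega) (ih (i + 1) _)
      · simp

theorem pvRun2_nil : pvRun 2 ([] : List Char) = pvRun 0 ([] : List Char) := by decide

theorem pvRun4_nil : pvRun 4 ([] : List Char) = pvRun 0 ([] : List Char) := by decide

theorem pvInnerPair_run (l : List Char) (fuel i : Nat) (acc : List Char)
    (hf : l.length ≤ i + 2 * fuel) :
    (pvInnerPair l l.length fuel i acc).2 ++ pvRun 2 (l.drop (pvInnerPair l l.length fuel i acc).1)
      = acc ++ pvRun 2 (l.drop i)
    ∧ pvRun 2 (l.drop (pvInnerPair l l.length fuel i acc).1)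
      = pvRun 0 (l.drop (pvInnerPair l l.length fuel i acc).1) := by
  induction fuel generalizing i acc with
  | zero =>
      have hd : l.drop i = [] := List.drop_eq_nil_of_le (by omega)
      refine ⟨rfl, ?_⟩
      simp only [pvInnerPair]
      rw [hd]
      exact pvRun2_nil
  | succ fuel ih =>
      simp only [pvInnerPair]
      split
      · next h =>
          obtain ⟨hlt, hcr, hnl⟩ := h
          have ihx := ih (i + 2) (acc ++ [l.getD i ' ', l.getD (i + 1) ' ']) (by omega)
          refine ⟨?_, ihx.2⟩
          have h1 : l.drop i = l.getD i ' ' :: l.drop (i + 1) := pvDrop_cons l i (by omega)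
          have h2 : l.drop (i + 1) = l.getD (i + 1) ' ' :: l.drop (i + 2) := pvDrop_cons l (i + 1) (by omega)
          rw [ihx.1, h1, h2, hcr, hnl, pvRun_cons, pvStep2_cr]
          simp only [List.nil_append]
          rw [pvRun_cons, pvStep3_nl]
          simp
      · next h =>
          exact ⟨rfl, pvRun2_eq_run0 _ (pvTake2_drop l i h)⟩

theorem pvInnerNl_run (l : List Char) (fuel i : Nat) (acc : List Char)
    (hf : l.length ≤ i + fuel) :
    (pvInnerNl l l.length fuel i acc).2 ++ pvRun 4 (l.drop (pvInnerNl l l.length fuel i acc).1)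
      = acc ++ pvRun 4 (l.drop i)
    ∧ pvRun 4 (l.drop (pvInnerNl l l.length fuel i acc).1)
      = pvRun 0 (l.drop (pvInnerNl l l.length fuel i acc).1) := by
  induction fuel generalizing i acc with
  | zero =>
      have hd : l.drop i = [] := List.drop_eq_nil_of_le (by omega)
      refine ⟨rfl, ?_⟩
      simp only [pvInnerNl]
      rw [hd]
      exact pvRun4_nil
  | succ fuel ih =>
      simp only [pvInnerNl]
      split
      · next h =>
          obtain ⟨hlt, hnl⟩ := h
          have ihx := ih (i + 1) (acc ++ [l.getD i ' ']) (by omega)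
          refine ⟨?_, ihx.2⟩
          have h1 : l.drop i = l.getD i ' ' :: l.drop (i + 1) := pvDrop_cons l i hlt
          rw [ihx.1, h1, hnl, pvRun_cons, pvStep4_nl]
          simp
      · next h =>
          exact ⟨rfl, pvRun4_eq_run0 _ (pvHead_drop l i h)⟩

theorem pvOuter_run (l : List Char) (fuel i : Nat) (acc : List Char)
    (hf : l.length ≤ i + fuel) :
    pvOuter l l.length fuel i acc = acc ++ pvRun 0 (l.drop i) := by
  induction fuel generalizing i acc with
  | zero =>
      have hd : l.drop i = [] := List.drop_eq_nil_of_le (by omega)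
      have h0 : pvRun 0 ([] : List Char) = [] := by decide
      simp only [pvOuter, hd, h0, List.append_nil]
  | succ fuel ih =>
      simp only [pvOuter]
      by_cases hlt : i < l.length
      · rw [if_pos hlt]
        split
        · next hpair =>
            obtain ⟨hcr, hlt2, hnl⟩ := hpair
            have h1 : l.drop i = l.getD i ' ' :: l.drop (i + 1) := pvDrop_cons l i hlt
            have h2 : l.drop (i + 1) = l.getD (i + 1) ' ' :: l.drop (i + 2) := pvDrop_cons l (i + 1) hlt2
            have hge := pvInnerPair_ge l l.length l.length (i + 2) acc
            have hip := pvInnerPair_run l l.length (i + 2) acc (by omega)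
            rw [ih _ _ (by omega), ← hip.2, hip.1, h1, h2, hcr, hnl, pvRun_cons, pvStep0_cr]
            simp only [List.nil_append]
            rw [pvRun_cons, pvStep1_nl]
            simp
        · next hpair =>
            split
            · next hnl =>
                have h1 : l.drop i = l.getD i ' ' :: l.drop (i + 1) := pvDrop_cons l i hlt
                have hge := pvInnerNl_ge l l.length l.length (i + 1) acc
                have hin := pvInnerNl_run l l.length (i + 1) acc (by omega)
                rw [ih _ _ (by omega), ← hin.2, hin.1, h1, hnl, pvRun_cons, pvStep0_nl]
                simp
            · next hnl =>
                have h1 : l.drop i = l.getD i ' ' :: l.drop (i + 1) := pvDrop_cons l i hlt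
                by_cases hcr : l.getD i ' ' = '\r'
                · -- lone '\r': no '\n' right after it (or end of string)
                  have hcond : (l.drop (i + 1)).head? ≠ some '\n' :=
                    pvHead_drop l (i + 1) (fun hx => hpair ⟨hcr, hx.1, hx.2⟩)
                  rw [ih _ _ (by omega), h1, hcr, pvRun_cons, pvStep0_cr,
                    pvRun1_eq (l.drop (i + 1)) hcond]
                  simp
                · rw [ih _ _ (by omega), h1, pvRun_cons, pvStep0_other (l.getD i ' ') hcr hnl]
                  simp
      · rw [if_neg hlt]
        have hd : l.drop i = [] := List.drop_eq_nil_of_le (by omega)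
        have h0 : pvRun 0 ([] : List Char) = [] := by decide
        rw [hd, h0, List.append_nil]

-- ===== VERDICT (by name: the statement is the Claim_ definition above) =====
theorem clean_decoded_text_py_spec : Claim_equal_clean_decoded_text_py := by
  intro text _
  unfold Spec_clean_decoded_text_py
  rw [pvAlt_eq_run]
  unfold clean_decoded_text_py
  rw [pvOuter_run _ _ _ _ (by omega)]
  simp
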